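-- pv_equiv track=rewrite | github.com/MrBrantCode/unitest_baseline | mut_generate/mist_train_taco/taco_11921/solution.py | count_substrings_with_k_minus_1_distinct_chars
-- ===== SOURCE A (Python) =====
-- def count_substrings_with_k_minus_1_distinct_chars(s: str, k: int) -> int:
--     count = 0
--     dic = {}
--     i = 0
--     j = 0
--
--     while j < len(s):
--         if s[j] in dic:
--             dic[s[j]] += 1
--         else:
--             dic[s[j]] = 1
--
--         if j - i + 1 == k:
--             if len(dic) == k - 1:
--                 count += 1
--
--         elif j - i + 1 > k:
--             dic[s[i]] -= 1
--             if dic[s[i]] == 0: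
--                 del dic[s[i]]
--             i += 1
--             if len(dic) == k - 1:
--                 count += 1
--
--         j += 1
--
--     return count
-- ===== SOURCE B (Python) =====
-- def count_substrings_with_k_minus_1_distinct_chars(s: str, k: int) -> int:
--     if k < 1:
--         return 0
--     count = 0
--     for i in range(len(s) - k + 1):
--         if len(set(s[i:i+k])) == k - 1:
--             count += 1
--     return count
-- ===== Notes on version B (the rewrite author's own statement) =====
-- stated objective: simpler
-- what changed: Replaces the incremental two-pointer frequency-dict sliding window with a direct scan over all window start positions that recomputes each length-k window's distinct-character count from scratch via set().
import Mathlib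
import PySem

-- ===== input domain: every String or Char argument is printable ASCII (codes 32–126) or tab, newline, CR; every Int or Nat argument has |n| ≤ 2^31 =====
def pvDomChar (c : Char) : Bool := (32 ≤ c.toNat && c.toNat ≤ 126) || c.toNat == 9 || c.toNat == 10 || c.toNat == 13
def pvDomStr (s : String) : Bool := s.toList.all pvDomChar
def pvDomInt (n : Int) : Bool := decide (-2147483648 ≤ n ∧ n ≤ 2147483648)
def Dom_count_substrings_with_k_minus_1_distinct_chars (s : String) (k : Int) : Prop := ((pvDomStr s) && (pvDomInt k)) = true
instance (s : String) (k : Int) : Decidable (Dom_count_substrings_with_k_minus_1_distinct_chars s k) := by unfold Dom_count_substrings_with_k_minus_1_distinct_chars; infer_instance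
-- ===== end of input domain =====

-- B replaces A's incremental two-pointer frequency-dict sliding window by a direct scan over all
-- window start positions, recomputing each length-k window's distinct count via set() (objective: simpler).

-- ===== PORT A =====
-- loop body of A's while loop (state: count, dic, i; loop variable j)
def pvStepA (cs : List Char) (k : Int) (st : Int × PySem.Dict Char Int × Int) (j : Int) :
    Int × PySem.Dict Char Int × Int :=
  let count := st.1
  let dic := st.2.1
  let i := st.2.2
  let cj := PySem.List.pyGetD cs j ' '
  let dic := if dic.contains cj then dic.modify cj 0 (· + 1) else dic.insert cj 1
  if j - i + 1 == k then
    (if (dic.size : Int) == k - 1 then count + 1 else count, dic, i)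
  else if j - i + 1 > k then
    let ci := PySem.List.pyGetD cs i ' '
    let dic := dic.modify ci 0 (· - 1)
    let dic := if dic.getD ci 0 == 0 then dic.erase ci else dic
    (if (dic.size : Int) == k - 1 then count + 1 else count, dic, i + 1)
  else (count, dic, i)
def count_substrings_with_k_minus_1_distinct_chars (s : String) (k : Int) : Int :=
  let cs := s.toList
  ((PySem.List.pyRange 0 (cs.length : Int) 1).foldl (pvStepA cs k) (0, PySem.Dict.empty, 0)).1

-- ===== PORT B =====
-- loop body of B's for loop over window start positions
def pvStepB (cs : List Char) (k : Int) (count : Int) (i : Int) : Int :=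
  if ((PySem.Set.ofList (PySem.List.slice cs (some i) (some (i + k)))).length : Int) == k - 1
  then count + 1 else count
def count_substrings_with_k_minus_1_distinct_chars_alt (s : String) (k : Int) : Int :=
  if k < 1 then 0
  else
    let cs := s.toList
    (PySem.List.pyRange 0 ((cs.length : Int) - k + 1) 1).foldl (pvStepB cs k) 0

-- ===== PRECONDITION & SPEC =====
def Spec_count_substrings_with_k_minus_1_distinct_chars (s : String) (k : Int) (out : Int) : Prop := out = count_substrings_with_k_minus_1_distinct_chars_alt s k
instance (s : String) (k : Int) (out : Int) : Decidable (Spec_count_substrings_with_k_minus_1_distinct_chars s k out) := by unfold Spec_count_substrings_with_k_minus_1_distinct_chars; infer_instance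

-- ===== CLAIM (what is proved, stated in full; the proofs are below) =====
def Claim_equal_count_substrings_with_k_minus_1_distinct_chars : Prop := ∀ (s : String) (k : Int), Dom_count_substrings_with_k_minus_1_distinct_chars s k → Spec_count_substrings_with_k_minus_1_distinct_chars s k (count_substrings_with_k_minus_1_distinct_chars s k)

-- ===== LEMMAS AND PROOFS =====

theorem pvKeys_erase (d : PySem.Dict Char Int) (c : Char) :
    (d.erase c).keys = d.keys.filter (fun x => !(x == c)) := by
  simp only [PySem.Dict.keys, PySem.Dict.erase]
  exact (List.filter_map (f := fun (x : Char × Int) => x.1) (p := fun x => !(x == c))).symm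

theorem pvNodup_keys_erase (d : PySem.Dict Char Int) (c : Char) (h : d.keys.Nodup) :
    (d.erase c).keys.Nodup := by
  rw [pvKeys_erase]; exact h.filter _

theorem pvContains_erase (d : PySem.Dict Char Int) (c c' : Char) :
    (d.erase c).contains c' = (!(c' == c) && d.contains c') := by
  simp only [PySem.Dict.contains, PySem.Dict.erase, List.any_filter]
  by_cases h2 : c' = c
  · subst h2
    simp only [BEq.rfl, Bool.not_true, Bool.false_and, List.any_eq_false]
    intro p _
    by_cases h1 : p.1 = c' <;> simp [h1]
  · have hne : (!(c' == c)) = true := by simp [h2]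
    rw [hne, Bool.true_and]
    apply List.any_congr rfl
    intro a
    by_cases h1 : a.1 = c'
    · simp [h1, h2]
    · simp [h1]

theorem pvGetD_erase (d : PySem.Dict Char Int) (c c' : Char) (h : d.keys.Nodup) :
    (d.erase c).getD c' 0 = if c' = c then 0 else d.getD c' 0 := by
  have hn : (d.erase c).keys.Nodup := pvNodup_keys_erase d c h
  by_cases hc : c' = c
  · subst hc
    have : (d.erase c').get? c' = none := by
      rw [PySem.Dict.get?_eq_none_iff_contains, pvContains_erase]
      simp
    simp [PySem.Dict.getD_eq_get?_getD, this]
  · rcases h2 : d.get? c' with _ | v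
    · have hcon : d.contains c' = false := (PySem.Dict.get?_eq_none_iff_contains d c').mp h2
      have : (d.erase c).get? c' = none := by
        rw [PySem.Dict.get?_eq_none_iff_contains, pvContains_erase, hcon]
        simp
      simp [PySem.Dict.getD_eq_get?_getD, this, h2, hc]
    · have hmem : (c', v) ∈ d.items := (PySem.Dict.get?_eq_some_iff_mem_items d c' v h).mp h2
      have hmem2 : (c', v) ∈ (d.erase c).items := by
        simp only [PySem.Dict.erase, List.mem_filter]
        exact ⟨hmem, by simp [hc]⟩
      have : (d.erase c).get? c' = some v := (PySem.Dict.get?_eq_some_iff_mem_items _ c' v hn).mpr hmem2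
      simp [PySem.Dict.getD_eq_get?_getD, this, h2, hc]
def pvNd (w : List Char) : Nat := (PySem.Set.ofList w).length
def pvDInv (w : List Char) (d : PySem.Dict Char Int) : Prop :=
  d.keys.Nodup ∧ (∀ c, d.getD c 0 = w.count c) ∧ (∀ c, d.contains c = true ↔ c ∈ w)
theorem pvDInv_add (w : List Char) (d : PySem.Dict Char Int) (c : Char) (h : pvDInv w d) :
    pvDInv (w ++ [c]) (if d.contains c then d.modify c 0 (· + 1) else d.insert c 1) := by
  obtain ⟨hnd, hcnt, hmem⟩ := h
  by_cases hc : d.contains c = true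
  · simp only [hc, if_true]
    refine ⟨?_, ?_, ?_⟩
    · have := PySem.Dict.keys_modify d c 0 (· + 1)
      rw [List.Nodup] at *
      rw [this, PySem.Dict.keys_insert_of_contains d _ hc]
      exact hnd
    · intro c'
      rw [PySem.Dict.getD_modify]
      by_cases h1 : c' = c
      · subst h1; simp [hcnt c', List.count_append]
      · simp [h1, Ne.symm h1, hcnt c', List.count_append]
    · intro c'
      rw [PySem.Dict.contains_modify]
      by_cases h1 : c' = c
      · subst h1; simp
      · simp [h1, hmem c']
  · have hc' : d.contains c = false := by simpa using hc
    simp only [hc', Bool.false_eq_true, if_false]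
    have hc0 : d.getD c 0 = 0 := PySem.Dict.getD_of_not_contains d 0 hc'
    have hcw : c ∉ w := fun hmw => hc ((hmem c).mpr hmw)
    refine ⟨PySem.Dict.nodup_keys_insert d c 1 hnd, ?_, ?_⟩
    · intro c'
      rw [PySem.Dict.getD_insert]
      by_cases h1 : c' = c
      · subst h1
        have : w.count c' = 0 := List.count_eq_zero.mpr hcw
        simp [List.count_append, this]
      · rw [if_neg h1, hcnt c']
        have : List.count c' [c] = 0 := by
          have hb : (c == c') = false := by simp; exact fun hh => h1 hh.symm
          rw [List.count_singleton, hb]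
          simp
        simp [List.count_append, this]
    · intro c'
      rw [PySem.Dict.contains_insert]
      by_cases h1 : c' = c
      · subst h1; simp
      · simp [h1, hmem c']

theorem pvDInv_remove (w : List Char) (d : PySem.Dict Char Int) (c : Char)
    (h : pvDInv (c :: w) d) :
    pvDInv w (if ((d.modify c 0 (· - 1)).getD c 0 == 0)
              then (d.modify c 0 (· - 1)).erase c else d.modify c 0 (· - 1)) := by
  obtain ⟨hnd, hcnt, hmem⟩ := h
  have hcin : d.contains c = true := (hmem c).mpr (List.mem_cons_self)
  have hndm : (d.modify c 0 (· - 1)).keys.Nodup := by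
    rw [PySem.Dict.keys_modify, PySem.Dict.keys_insert_of_contains d _ hcin]; exact hnd
  have hgm : ∀ c', (d.modify c 0 (· - 1)).getD c' 0 = if c' = c then (c :: w).count c - 1 else (c :: w).count c' := by
    intro c'
    rw [PySem.Dict.getD_modify]
    by_cases h1 : c' = c <;> simp [h1, hcnt]
  have hcm : ∀ c', (d.modify c 0 (· - 1)).contains c' = d.contains c' := by
    intro c'
    rw [PySem.Dict.contains_modify]
    by_cases h1 : c' = c
    · subst h1; simp [hcin]
    · simp [h1]
  have hself : (d.modify c 0 (· - 1)).getD c 0 = (w.count c : Int) := by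
    rw [hgm c]; simp [List.count_cons_self]
  by_cases h0 : w.count c = 0
  · have : ((d.modify c 0 (· - 1)).getD c 0 == 0) = true := by simp [hself, h0]
    rw [this, if_pos rfl]
    have hcw : c ∉ w := List.count_eq_zero.mp h0
    refine ⟨pvNodup_keys_erase _ c hndm, ?_, ?_⟩
    · intro c'
      rw [pvGetD_erase _ c c' hndm]
      by_cases h1 : c' = c
      · subst h1; simp [h0]
      · rw [if_neg h1, hgm c', if_neg h1]
        simp [Ne.symm h1]
    · intro c'
      rw [pvContains_erase]
      by_cases h1 : c' = c
      · subst h1; simp [hcw]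
      · have hne : (!(c' == c)) = true := by simp [h1]
        rw [hne, Bool.true_and, hcm c', hmem c']
        simp [h1]
  · have : ((d.modify c 0 (· - 1)).getD c 0 == 0) = false := by
      simp [hself]; omega
    rw [this, if_neg (by simp)]
    refine ⟨hndm, ?_, ?_⟩
    · intro c'
      rw [hgm c']
      by_cases h1 : c' = c
      · subst h1; simp [List.count_cons_self]
      · rw [if_neg h1]
        have : List.count c' (c :: w) = List.count c' w := by
          have hb : (c == c') = false := by simp; exact fun hh => h1 hh.symm
          rw [List.count_cons, hb]
          simp
        rw [this]
    · intro c'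
      rw [hcm c', hmem c']
      by_cases h1 : c' = c
      · subst h1
        simp [List.count_pos_iff.mp (Nat.pos_of_ne_zero h0)]
      · simp [h1]

theorem pvSize_of_DInv (w : List Char) (d : PySem.Dict Char Int) (h : pvDInv w d) :
    d.size = pvNd w := by
  obtain ⟨hnd, -, hmem⟩ := h
  have hkeys : ∀ c, c ∈ d.keys ↔ c ∈ w := by
    intro c
    rw [← PySem.Dict.contains_iff_mem_keys, hmem c]
  have h1 : d.size = d.keys.length := by
    simp [PySem.Dict.size, PySem.Dict.keys]
  have h2 : d.keys.toFinset = (PySem.Set.ofList w : List Char).toFinset := by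
    ext c
    simp [hkeys c, PySem.Set.mem_ofList]
  rw [h1, ← List.toFinset_card_of_nodup hnd, h2,
      List.toFinset_card_of_nodup (PySem.Set.nodup_ofList w)]
  rfl
def pvWin (cs : List Char) (k : Int) (j : Nat) : List Char := (cs.take j).drop (j - k.toNat)

def pvP (cs : List Char) (k : Int) (jj : Nat) : Bool :=
  decide (k ≤ (jj : Int) + 1) && ((pvNd (pvWin cs k (jj + 1)) : Int) == k - 1)

def pvAcnt (cs : List Char) (k : Int) (j : Nat) : Int :=
  (((List.range j).countP (pvP cs k) : Nat) : Int)

theorem pvAcnt_succ (cs : List Char) (k : Int) (j : Nat) :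
    pvAcnt cs k (j + 1) = pvAcnt cs k j + (if pvP cs k j then 1 else 0) := by
  unfold pvAcnt
  rw [List.range_succ, List.countP_append]
  by_cases h : pvP cs k j <;> simp [h]
theorem pvInvA (cs : List Char) (k : Int) (hk : 1 ≤ k) :
    ∀ j : Nat, j ≤ cs.length →
    ∃ d, (PySem.List.pyRange 0 (j : Int) 1).foldl (pvStepA cs k) (0, PySem.Dict.empty, 0)
          = (pvAcnt cs k j, d, ((j - k.toNat : Nat) : Int)) ∧ pvDInv (pvWin cs k j) d := by
  have hK : (k.toNat : Int) = k := Int.toNat_of_nonneg (by omega)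
  intro j
  induction j with
  | zero =>
    intro _
    refine ⟨PySem.Dict.empty, ?_, ?_, ?_, ?_⟩
    · have : PySem.List.pyRange 0 (0 : Int) 1 = [] := by decide
      rw [Nat.cast_zero, this]
      simp [pvAcnt]
    · exact PySem.Dict.nodup_keys_empty
    · intro c; simp [PySem.Dict.getD_empty, pvWin]
    · intro c; simp [PySem.Dict.contains_empty, pvWin]
  | succ j ih =>
    intro hj
    have hjlt : j < cs.length := by omega
    obtain ⟨d, hfold, hinv⟩ := ih (by omega)
    have hrange : PySem.List.pyRange 0 ((j + 1 : Nat) : Int) 1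
        = PySem.List.pyRange 0 (j : Int) 1 ++ [(j : Int)] := by
      push_cast
      exact PySem.List.pyRange_one_succ_right (by positivity)
    rw [hrange, List.foldl_append, hfold]
    have hcj : PySem.List.pyGetD cs (j : Int) ' ' = cs[j] := by
      rw [PySem.List.pyGetD_natCast]; exact List.getD_eq_getElem cs ' ' hjlt
    set c := cs[j] with hc
    have hinv1 : pvDInv (pvWin cs k j ++ [c])
        (if d.contains c then d.modify c 0 (· + 1) else d.insert c 1) := pvDInv_add _ d c hinv
    rcases Nat.lt_or_ge (j + 1) k.toNat with hcase | hcase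
    · -- j + 1 < k : window still growing, no check
      have hw1 : pvWin cs k j = cs.take j := by
        unfold pvWin; rw [Nat.sub_eq_zero_of_le (by omega), List.drop_zero]
      have hw2 : pvWin cs k (j + 1) = pvWin cs k j ++ [c] := by
        unfold pvWin
        rw [Nat.sub_eq_zero_of_le (by omega), Nat.sub_eq_zero_of_le (by omega),
            List.drop_zero, List.drop_zero]
        exact List.take_succ_eq_append_getElem hjlt
      have hb1 : (((j : Int) - ((j - k.toNat : Nat) : Int) + 1 == k)) = false := by
        simp only [beq_eq_false_iff_ne, ne_eq]; omega
      have hb2 : ¬ ((j : Int) - ((j - k.toNat : Nat) : Int) + 1 > k) := by omega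
      refine ⟨(if d.contains c then d.modify c 0 (· + 1) else d.insert c 1), ?_, ?_⟩
      · simp only [List.foldl_cons, List.foldl_nil, pvStepA, hcj, hb1, Bool.false_eq_true, if_false, if_neg hb2]
        have hP : pvP cs k j = false := by
          unfold pvP
          simp only [Bool.and_eq_false_iff]
          left; simp; omega
        rw [pvAcnt_succ, hP]
        simp only [Bool.false_eq_true, if_false, add_zero]
        refine congrArg₂ _ rfl (congrArg₂ _ rfl ?_)
        omega
      · rw [hw2] at ⊢
        exact hinv1
    · rcases Nat.eq_or_lt_of_le hcase with hcase2 | hcase2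
      · -- j + 1 = k : first full window, first branch
        have hw2 : pvWin cs k (j + 1) = pvWin cs k j ++ [c] := by
          unfold pvWin
          rw [Nat.sub_eq_zero_of_le (by omega), Nat.sub_eq_zero_of_le (by omega),
              List.drop_zero, List.drop_zero]
          exact List.take_succ_eq_append_getElem hjlt
        have hb1 : (((j : Int) - ((j - k.toNat : Nat) : Int) + 1 == k)) = true := by
          simp only [beq_iff_eq]; omega
        refine ⟨(if d.contains c then d.modify c 0 (· + 1) else d.insert c 1), ?_, ?_⟩
        · simp only [List.foldl_cons, List.foldl_nil, pvStepA, hcj, hb1, if_true]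
          have hsz : ((if d.contains c then d.modify c 0 (· + 1) else d.insert c 1).size : Int)
              = (pvNd (pvWin cs k (j + 1)) : Int) := by
            rw [pvSize_of_DInv _ _ (hw2 ▸ hinv1)]
          have hP : pvP cs k j = ((pvNd (pvWin cs k (j + 1)) : Int) == k - 1) := by
            unfold pvP
            have : decide (k ≤ (j : Int) + 1) = true := by simp; omega
            rw [this, Bool.true_and]
          rw [pvAcnt_succ, hP, hsz]
          refine congrArg₂ _ ?_ (congrArg₂ _ rfl ?_)
          · by_cases hb : ((pvNd (pvWin cs k (j + 1)) : Int) == k - 1) = true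
            · rw [hb]; simp
            · rw [Bool.not_eq_true] at hb; rw [hb]; simp
          · omega
        · rw [hw2] at ⊢; exact hinv1
      · -- k ≤ j : sliding, elif branch
        have hci : PySem.List.pyGetD cs (((j - k.toNat : Nat)) : Int) ' ' = cs[j - k.toNat] := by
          rw [PySem.List.pyGetD_natCast]
          exact List.getD_eq_getElem cs ' ' (by omega)
        have hw' : pvWin cs k j ++ [c] = cs[j - k.toNat]'(by omega) :: pvWin cs k (j + 1) := by
          unfold pvWin
          have h1 : (cs.take j).drop (j - k.toNat) ++ [c]
              = (cs.take (j + 1)).drop (j - k.toNat) := by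
            rw [List.take_succ_eq_append_getElem hjlt,
                List.drop_append_of_le_length (by simp; omega)]
          rw [h1, List.drop_eq_getElem_cons (by simp; omega)]
          have : (cs.take (j + 1))[j - k.toNat]'(by simp; omega) = cs[j - k.toNat]'(by omega) :=
            List.getElem_take
          rw [this]
          have : j + 1 - k.toNat = (j - k.toNat) + 1 := by omega
          rw [this]
        have hb1 : (((j : Int) - ((j - k.toNat : Nat) : Int) + 1 == k)) = false := by
          simp only [beq_eq_false_iff_ne, ne_eq]; omega
        have hb2 : ((j : Int) - ((j - k.toNat : Nat) : Int) + 1 > k) := by omega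
        have hinv2 := pvDInv_remove _ _ _ (hw' ▸ hinv1)
        refine ⟨_, ?_, hinv2⟩
        · simp only [List.foldl_cons, List.foldl_nil, pvStepA, hcj, hci, hb1, Bool.false_eq_true, if_false, if_pos hb2]
          have hsz : ∀ d', pvDInv (pvWin cs k (j + 1)) d' → (d'.size : Int) = (pvNd (pvWin cs k (j + 1)) : Int) := by
            intro d' h'; rw [pvSize_of_DInv _ _ h']
          rw [hsz _ hinv2]
          have hP : pvP cs k j = ((pvNd (pvWin cs k (j + 1)) : Int) == k - 1) := by
            unfold pvP
            have : decide (k ≤ (j : Int) + 1) = true := by simp; omega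
            rw [this, Bool.true_and]
          rw [pvAcnt_succ, hP]
          refine congrArg₂ _ ?_ (congrArg₂ _ rfl ?_)
          · by_cases hb : ((pvNd (pvWin cs k (j + 1)) : Int) == k - 1) = true
            · rw [hb]; simp
            · rw [Bool.not_eq_true] at hb; rw [hb]; simp
          · omega
theorem pvInvA_nonpos (cs : List Char) (k : Int) (hk : k ≤ 0) :
    ∀ j : Nat, j ≤ cs.length →
    ∃ d, (PySem.List.pyRange 0 (j : Int) 1).foldl (pvStepA cs k) (0, PySem.Dict.empty, 0)
          = (0, d, (j : Int)) := by
  intro j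
  induction j with
  | zero =>
    intro _
    refine ⟨PySem.Dict.empty, ?_⟩
    have : PySem.List.pyRange 0 (0 : Int) 1 = [] := by decide
    rw [Nat.cast_zero, this]
    rfl
  | succ j ih =>
    intro hj
    obtain ⟨d, hfold⟩ := ih (by omega)
    have hrange : PySem.List.pyRange 0 ((j + 1 : Nat) : Int) 1
        = PySem.List.pyRange 0 (j : Int) 1 ++ [(j : Int)] := by
      push_cast
      exact PySem.List.pyRange_one_succ_right (by positivity)
    rw [hrange, List.foldl_append, hfold]
    have hb1 : (((j : Int) - (j : Int) + 1 == k)) = false := by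
      simp only [beq_eq_false_iff_ne, ne_eq]; omega
    have hb2 : ((j : Int) - (j : Int) + 1 > k) := by omega
    refine ⟨(let cj := PySem.List.pyGetD cs (j : Int) ' ';
             let d1 := if d.contains cj then d.modify cj 0 (· + 1) else d.insert cj 1;
             let d2 := d1.modify cj 0 (· - 1);
             if d2.getD cj 0 == 0 then d2.erase cj else d2), ?_⟩
    simp only [List.foldl_cons, List.foldl_nil, pvStepA, hb1, Bool.false_eq_true, if_false,
      if_pos hb2]
    have hsz : ∀ d' : PySem.Dict Char Int, ((d'.size : Int) == k - 1) = false := by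
      intro d'
      simp only [beq_eq_false_iff_ne, ne_eq]
      omega
    rw [hsz]
    simp only [Bool.false_eq_true, if_false]
    refine congrArg₂ _ rfl (congrArg₂ _ rfl ?_)
    push_cast
    ring

theorem pvB_nonpos (s : String) (k : Int) (hk : k ≤ 0) :
    count_substrings_with_k_minus_1_distinct_chars_alt s k = 0 := by
  unfold count_substrings_with_k_minus_1_distinct_chars_alt
  rw [if_pos (by omega : k < 1)]

theorem pvB_eq (s : String) (k : Int) (hk : 1 ≤ k) :
    count_substrings_with_k_minus_1_distinct_chars_alt s k = pvAcnt s.toList k s.toList.length := by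
  have hK : (k.toNat : Int) = k := Int.toNat_of_nonneg (by omega)
  unfold count_substrings_with_k_minus_1_distinct_chars_alt
  rw [if_neg (by omega : ¬ k < 1)]
  show (PySem.List.pyRange 0 ((s.toList.length : Int) - k + 1) 1).foldl (pvStepB s.toList k) 0
      = pvAcnt s.toList k s.toList.length
  set cs := s.toList with hcs
  set n := cs.length with hn
  set K := k.toNat with hKdef
  rw [PySem.List.pyRange_one, List.foldl_map]
  have hstep : ∀ (cnt : Int) (t : Nat), pvStepB cs k cnt (0 + (t : Int))
      = if ((pvNd (pvWin cs k (t + K)) : Int) == k - 1) then cnt + 1 else cnt := by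
    intro cnt t
    unfold pvStepB
    have hsl : PySem.List.slice cs (some (0 + (t : Int))) (some (0 + (t : Int) + k))
        = pvWin cs k (t + K) := by
      rw [zero_add]
      have h1 : (t : Int) + k = ((t + K : Nat) : Int) := by push_cast; omega
      rw [h1, PySem.List.slice_natCast]
      unfold pvWin
      rw [List.drop_take]
      congr 1
      · omega
      · congr 1; omega
    rw [hsl]
    rfl
  have hfun : (fun (cnt : Int) (t : Nat) => pvStepB cs k cnt (0 + (t : Int)))
      = (fun (cnt : Int) (t : Nat) =>
          if ((pvNd (pvWin cs k (t + K)) : Int) == k - 1) then cnt + 1 else cnt) := by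
    funext cnt t
    exact hstep cnt t
  rw [hfun, PySem.List.foldl_if_add_one
    (fun (t : Nat) => ((pvNd (pvWin cs k (t + K)) : Int) == k - 1))]
  have hPfalse : ∀ jj : Nat, (jj : Int) + 1 < k → pvP cs k jj = false := by
    intro jj hjj
    unfold pvP
    simp only [Bool.and_eq_false_iff]
    left; simp; omega
  rcases Nat.lt_or_ge n K with hnK | hnK
  · have h0 : ((n : Int) - k + 1 - 0).toNat = 0 := by omega
    have hz0 : (List.range n).countP (pvP cs k) = 0 := by
      apply List.countP_eq_zero.mpr
      intro jj hjj
      rw [List.mem_range] at hjj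
      rw [hPfalse jj (by omega)]
      simp
    have h1 : pvAcnt cs k n = ((List.range n).countP (pvP cs k) : Nat) := rfl
    rw [h0, h1, hz0]
    simp
  · have hM : ((n : Int) - k + 1 - 0).toNat = n - K + 1 := by omega
    rw [hM]
    have hsplit : n = (K - 1) + (n - K + 1) := by omega
    have h1 : pvAcnt cs k n = ((List.range n).countP (pvP cs k) : Nat) := rfl
    have hz : (List.range (K - 1)).countP (pvP cs k) = 0 := by
      apply List.countP_eq_zero.mpr
      intro jj hjj
      rw [List.mem_range] at hjj
      rw [hPfalse jj (by omega)]
      simp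
    rw [h1]
    conv_rhs => rw [hsplit, List.range_add, List.countP_append, hz, Nat.zero_add,
      List.countP_map]
    rw [zero_add]
    congr 1
    apply List.countP_congr
    intro t ht
    rw [List.mem_range] at ht
    simp only [Function.comp]
    unfold pvP
    have hd : decide (k ≤ ((K - 1 + t : Nat) : Int) + 1) = true := by simp; omega
    rw [hd, Bool.true_and]
    have he : (K - 1 + t) + 1 = t + K := by omega
    rw [he]

-- ===== VERDICT (by name: the statement is the Claim_ definition above) =====
theorem count_substrings_with_k_minus_1_distinct_chars_spec : Claim_equal_count_substrings_with_k_minus_1_distinct_chars := by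
  intro s k _
  unfold Spec_count_substrings_with_k_minus_1_distinct_chars
  unfold count_substrings_with_k_minus_1_distinct_chars
  rcases lt_or_ge k 1 with hk | hk
  · obtain ⟨d, hfold⟩ := pvInvA_nonpos s.toList k (by omega) s.toList.length le_rfl
    simp only [hfold, pvB_nonpos s k (by omega)]
  · obtain ⟨d, hfold, -⟩ := pvInvA s.toList k hk s.toList.length le_rfl
    simp only [hfold, pvB_eq s k hk]
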